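-- pv_equiv track=rewrite | github.com/rcc00n/bgm_crm | store/management/commands/import_product_images.py | _iter_ranked_group_image_urls
-- ===== SOURCE A (Python) =====
-- from typing import Dict, FrozenSet, Iterable, List, Optional, Tuple
--
-- def _iter_ranked_group_image_urls(group: List[Dict[str, str]]) -> List[str]:
--     """
--     Shopify-like imports can contain multiple rows per handle.
--     We rank images deterministically:
--     - Sort by Image Position (lowest wins), tie-breaking by earliest occurrence.
--     - Deduplicate URLs while preserving the best-positioned occurrence.
--     """
--     best_by_url: Dict[str, Tuple[int, int]] = {}
--     for idx, row in enumerate(group):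
--         raw = (row.get("Image Src") or row.get("Variant Image") or "").strip()
--         if not raw:
--             continue
--         pos_raw = (row.get("Image Position") or "").strip()
--         try:
--             pos = int(pos_raw) if pos_raw else 10**9
--         except Exception:
--             pos = 10**9
--         key = (pos, idx)
--         if raw not in best_by_url or key < best_by_url[raw]:
--             best_by_url[raw] = key
--     return [url for url, _key in sorted(best_by_url.items(), key=lambda kv: kv[1])]
-- ===== SOURCE B (Python) =====
-- from typing import Dict, List
--
--
-- def _iter_ranked_group_image_urls(group: List[Dict[str, str]]) -> List[str]:
--     # Flatten to (pos, idx, url) tuples, sort once by (pos, idx), then keep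
--     # the first occurrence of each url while scanning the sorted list.
--     tuples = []
--     for idx, row in enumerate(group):
--         raw = (row.get("Image Src") or row.get("Variant Image") or "").strip()
--         if not raw:
--             continue
--         pos_raw = (row.get("Image Position") or "").strip()
--         try:
--             pos = int(pos_raw) if pos_raw else 10**9
--         except Exception:
--             pos = 10**9
--         tuples.append((pos, idx, raw))
--     tuples.sort(key=lambda t: (t[0], t[1]))
--     seen = set()
--     out = []
--     for _pos, _idx, url in tuples:
--         if url not in seen:
--             seen.add(url)
--             out.append(url)
--     return out
-- ===== Notes on version B (the rewrite author's own statement) =====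
-- stated objective: alternative
-- what changed: Instead of maintaining a dict of the best (pos, idx) key per url and sorting the dict items at the end, B flattens the rows into one (pos, idx, url) tuple list, sorts it once by (pos, idx), and deduplicates urls in a single scan over the sorted list with a seen-set.
import Mathlib
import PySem

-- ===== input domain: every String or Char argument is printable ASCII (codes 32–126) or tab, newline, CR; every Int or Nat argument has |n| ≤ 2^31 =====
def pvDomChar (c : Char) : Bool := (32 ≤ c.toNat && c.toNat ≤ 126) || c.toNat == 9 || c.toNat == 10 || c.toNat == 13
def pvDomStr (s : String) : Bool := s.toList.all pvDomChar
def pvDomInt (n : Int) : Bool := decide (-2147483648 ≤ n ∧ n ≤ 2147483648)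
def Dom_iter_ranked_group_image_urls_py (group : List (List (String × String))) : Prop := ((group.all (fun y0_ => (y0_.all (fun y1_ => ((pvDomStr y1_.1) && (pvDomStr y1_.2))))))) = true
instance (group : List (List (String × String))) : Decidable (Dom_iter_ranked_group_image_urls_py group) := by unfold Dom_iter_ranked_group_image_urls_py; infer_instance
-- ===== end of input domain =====

-- B re-implements A by a different decomposition: one flat (pos, idx, url) list sorted once by
-- (pos, idx) and deduplicated in a single scan, instead of A's best-key-per-url dict sorted at the end.

-- ===== PORT A =====
-- raw = (row.get("Image Src") or row.get("Variant Image") or "").strip()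
def pvRawOf (row : PySem.Dict String String) : String :=
  PySem.Str.strip
    (if ((row.get? "Image Src").getD "") ≠ "" then (row.get? "Image Src").getD ""
     else (row.get? "Variant Image").getD "")

-- pos_raw = (row.get("Image Position") or "").strip(); try: pos = int(pos_raw) if pos_raw else 10**9 except: pos = 10**9
def pvPosOf (row : PySem.Dict String String) : Int :=
  let pr := PySem.Str.strip ((row.get? "Image Position").getD "")
  if pr = "" then 10 ^ 9
  else match PySem.Int.ofStr? pr with
       | some n => n
       | none => 10 ^ 9

-- A's Python tuple keys (pos, idx) compare lexicographically: ported as Int ×ₗ Int (Lex order), which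
-- is exactly Python's tuple comparison on integer pairs.
def iter_ranked_group_image_urls_py (group : List (List (String × String))) : List String :=
  let best : PySem.Dict String (Int ×ₗ Int) :=
    (PySem.List.enumerate group).foldl
      (fun best p =>
        let row := PySem.Dict.ofList p.2
        let raw := pvRawOf row
        if raw = "" then best
        else
          let key : Int ×ₗ Int := toLex (pvPosOf row, p.1)
          match best.get? raw with
          | none => best.insert raw key
          | some k => if key < k then best.insert raw key else best)
      PySem.Dict.empty
  (PySem.List.sorted best.items (fun kv => kv.2)).map (fun kv => kv.1)

-- ===== PORT B =====
-- tuples.sort(key=lambda t: (t[0], t[1])): the tuple key is ported as Int ×ₗ Int (Python's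
-- lexicographic tuple comparison on integer pairs).
def iter_ranked_group_image_urls_py_alt (group : List (List (String × String))) : List String :=
  let tuples : List (Int × Int × String) :=
    (PySem.List.enumerate group).foldl
      (fun acc p =>
        let row := PySem.Dict.ofList p.2
        let raw := pvRawOf row
        if raw = "" then acc
        else acc ++ [(pvPosOf row, p.1, raw)])
      []
  let sortedTuples := PySem.List.sorted tuples (fun t => (toLex (t.1, t.2.1) : Int ×ₗ Int))
  (sortedTuples.foldl
      (fun (st : PySem.Set String × List String) t =>
        if PySem.Set.contains st.1 t.2.2 then st
        else (PySem.Set.add st.1 t.2.2, st.2 ++ [t.2.2]))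
      (PySem.Set.empty, [])).2

-- ===== PRECONDITION & SPEC =====
def Spec_iter_ranked_group_image_urls_py (group : List (List (String × String))) (out : List String) : Prop := out = iter_ranked_group_image_urls_py_alt group
instance (group : List (List (String × String))) (out : List String) : Decidable (Spec_iter_ranked_group_image_urls_py group out) := by unfold Spec_iter_ranked_group_image_urls_py; infer_instance

-- ===== CLAIM (what is proved, stated in full; the proofs are below) =====
def Claim_equal_iter_ranked_group_image_urls_py : Prop := ∀ (group : List (List (String × String))), Dom_iter_ranked_group_image_urls_py group → Spec_iter_ranked_group_image_urls_py group (iter_ranked_group_image_urls_py group)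

-- ===== LEMMAS AND PROOFS =====

-- the per-row extraction both loops share: `none` exactly when the row is skipped
def pvExt (p : Int × List (String × String)) : Option (Int × Int × String) :=
  let row := PySem.Dict.ofList p.2
  let raw := pvRawOf row
  if raw = "" then none else some (pvPosOf row, p.1, raw)

def pvKB (t : Int × Int × String) : Int ×ₗ Int := toLex (t.1, t.2.1)

def pvUrl (t : Int × Int × String) : String := t.2.2

-- A's dict-update step on an extracted tuple
def pvUpd (best : PySem.Dict String (Int ×ₗ Int)) (t : Int × Int × String) : PySem.Dict String (Int ×ₗ Int) :=
  match best.get? t.2.2 with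
  | none => best.insert t.2.2 (pvKB t)
  | some k => if pvKB t < k then best.insert t.2.2 (pvKB t) else best

def pvTs (group : List (List (String × String))) : List (Int × Int × String) :=
  (PySem.List.enumerate group).filterMap pvExt

-- first-occurrence-per-url dedup of a tuple list (fuel = length, for clean equations)
def pvFirstByAux : Nat → List (Int × Int × String) → List (Int × Int × String)
  | _, [] => []
  | 0, _ :: _ => []
  | n + 1, t :: r => t :: pvFirstByAux n (r.filter (fun t' => t'.2.2 ≠ t.2.2))

def pvFirstBy (l : List (Int × Int × String)) : List (Int × Int × String) :=
  pvFirstByAux l.length l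

theorem pvFirstByAux_congr (n : Nat) : ∀ (m : Nat) (l : List (Int × Int × String)),
    l.length ≤ n → l.length ≤ m → pvFirstByAux n l = pvFirstByAux m l := by
  induction n with
  | zero =>
    intro m l hn _
    have : l = [] := List.eq_nil_of_length_eq_zero (Nat.le_zero.mp hn)
    subst this
    cases m <;> rfl
  | succ n ih =>
    intro m l hn hm
    cases l with
    | nil => cases m <;> rfl
    | cons t r =>
      cases m with
      | zero => simp at hm
      | succ m =>
        simp only [pvFirstByAux]
        congr 1
        exact ih m _ ((List.length_filter_le _ _).trans (by simpa using hn))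
          ((List.length_filter_le _ _).trans (by simpa using hm))

theorem pvFirstBy_cons (t : Int × Int × String) (r : List (Int × Int × String)) :
    pvFirstBy (t :: r) = t :: pvFirstBy (r.filter (fun t' => t'.2.2 ≠ t.2.2)) := by
  rw [pvFirstBy, pvFirstBy, List.length_cons, pvFirstByAux]
  congr 1
  exact pvFirstByAux_congr r.length _ _ (List.length_filter_le _ _) le_rfl

theorem pvFirstBy_induction (P : List (Int × Int × String) → Prop) (h0 : P [])
    (h1 : ∀ t r, P (r.filter (fun t' => t'.2.2 ≠ t.2.2)) → P (t :: r)) : ∀ l, P l := by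
  have key : ∀ (n : Nat) (l : List (Int × Int × String)), l.length ≤ n → P l := by
    intro n
    induction n with
    | zero =>
      intro l hl
      have : l = [] := List.eq_nil_of_length_eq_zero (Nat.le_zero.mp hl)
      subst this; exact h0
    | succ n ih =>
      intro l hl
      cases l with
      | nil => exact h0
      | cons t r =>
        exact h1 t r (ih _ ((List.length_filter_le _ _).trans (by simpa using hl)))
  exact fun l => key l.length l le_rfl

-- pointwise minimum on optional keys
def pvOmin (a b : Option (Int ×ₗ Int)) : Option (Int ×ₗ Int) :=
  match a, b with
  | none, b => b
  | some x, none => some x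
  | some x, some y => some (min x y)

def pvVal (u : String) (t : Int × Int × String) : Option (Int ×ₗ Int) :=
  if t.2.2 = u then some (pvKB t) else none

-- minimal key among the entries of l carrying url u
def pvMk (u : String) : List (Int × Int × String) → Option (Int ×ₗ Int)
  | [] => none
  | t :: r => pvOmin (pvVal u t) (pvMk u r)

theorem pv_omin_none_right (a : Option (Int ×ₗ Int)) : pvOmin a none = a := by
  cases a <;> rfl

theorem pv_omin_left_comm (a b c : Option (Int ×ₗ Int)) :
    pvOmin a (pvOmin b c) = pvOmin b (pvOmin a c) := by
  cases a <;> cases b <;> cases c <;> simp [pvOmin, min_left_comm, min_comm]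

theorem pv_omin_assoc (a b c : Option (Int ×ₗ Int)) :
    pvOmin (pvOmin a b) c = pvOmin a (pvOmin b c) := by
  cases a <;> cases b <;> cases c <;> simp [pvOmin, min_assoc]

theorem pv_mk_perm {l l' : List (Int × Int × String)} (h : l.Perm l') (u : String) :
    pvMk u l = pvMk u l' := by
  induction h with
  | nil => rfl
  | cons x _ ih => simp [pvMk, ih]
  | swap x y l => simp [pvMk, pv_omin_left_comm]
  | trans _ _ ih1 ih2 => rw [ih1, ih2]

theorem pv_mk_mem (u : String) (l : List (Int × Int × String)) :
    ∀ y : Int ×ₗ Int, pvMk u l = some y → ∃ t ∈ l, t.2.2 = u ∧ y = pvKB t := by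
  induction l with
  | nil => intro y h; simp [pvMk] at h
  | cons t r ih =>
    intro y h
    rw [pvMk] at h
    by_cases ht : t.2.2 = u
    · cases hr : pvMk u r with
      | none =>
        rw [hr, pv_omin_none_right, pvVal, if_pos ht] at h
        exact ⟨t, by simp, ht, by simpa using h.symm⟩
      | some z =>
        rw [hr, pvVal, if_pos ht] at h
        simp only [pvOmin, Option.some.injEq] at h
        rcases le_total (pvKB t) z with hle | hle
        · exact ⟨t, by simp, ht, by rw [← h, min_eq_left hle]⟩
        · obtain ⟨t', ht', hu', hy'⟩ := ih z hr
          exact ⟨t', by simp [ht'], hu', by rw [← h, min_eq_right hle, hy']⟩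
    · rw [pvVal, if_neg ht] at h
      simp only [pvOmin] at h
      obtain ⟨t', ht', hu', hy'⟩ := ih y h
      exact ⟨t', by simp [ht'], hu', hy'⟩

theorem pv_mk_filter {u w : String} (hw : w ≠ u) (l : List (Int × Int × String)) :
    pvMk u (l.filter (fun t' => t'.2.2 ≠ w)) = pvMk u l := by
  induction l with
  | nil => rfl
  | cons t r ih =>
    by_cases ht : t.2.2 = w
    · have hv : pvVal u t = none := by
        rw [pvVal, if_neg]; rw [ht]; exact hw
      rw [List.filter_cons_of_neg (by simp [ht]), ih, pvMk, hv]
      rfl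
    · rw [List.filter_cons_of_pos (by simp [ht]), pvMk, pvMk, ih]

theorem pv_upd_get? (d : PySem.Dict String (Int ×ₗ Int)) (t : Int × Int × String) (u : String) :
    (pvUpd d t).get? u = pvOmin (d.get? u) (pvVal u t) := by
  rw [pvUpd]
  by_cases hu : t.2.2 = u
  · subst hu
    cases hd : d.get? t.2.2 with
    | none => simp [PySem.Dict.get?_insert_self, pvVal, hd, pvOmin]
    | some k =>
      by_cases hlt : pvKB t < k
      · simp [hlt, PySem.Dict.get?_insert_self, pvVal, hd, pvOmin, min_eq_right hlt.le]
      · simp [hlt, pvVal, hd, pvOmin, min_eq_left (le_of_not_gt hlt)]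
  · have hne : u ≠ t.2.2 := fun h => hu h.symm
    have hv : pvVal u t = none := by rw [pvVal, if_neg hu]
    rw [hv, pv_omin_none_right]
    cases hd : d.get? t.2.2 with
    | none => exact PySem.Dict.get?_insert_of_ne _ _ hne
    | some k =>
      by_cases hlt : pvKB t < k
      · simp only [hlt, if_true]
        exact PySem.Dict.get?_insert_of_ne _ _ hne
      · simp [hlt]

theorem pv_get?_fold (l : List (Int × Int × String)) (d : PySem.Dict String (Int ×ₗ Int)) (u : String) :
    ((l.foldl pvUpd d).get? u) = pvOmin (d.get? u) (pvMk u l) := by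
  induction l generalizing d with
  | nil => rw [List.foldl_nil, pvMk, pv_omin_none_right]
  | cons t r ih =>
    rw [List.foldl_cons, ih, pv_upd_get?, pv_omin_assoc, pvMk]

theorem pv_nodup_fold (l : List (Int × Int × String)) (d : PySem.Dict String (Int ×ₗ Int))
    (h : d.keys.Nodup) : ((l.foldl pvUpd d).keys).Nodup := by
  induction l generalizing d with
  | nil => exact h
  | cons t r ih =>
    rw [List.foldl_cons]
    apply ih
    rw [pvUpd]
    cases hd : d.get? t.2.2 with
    | none => exact PySem.Dict.nodup_keys_insert _ _ _ h
    | some k =>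
      by_cases hlt : pvKB t < k
      · simpa [hlt] using PySem.Dict.nodup_keys_insert _ _ _ h
      · simpa [hlt] using h

theorem pv_foldlA (l : List (Int × List (String × String))) (d : PySem.Dict String (Int ×ₗ Int)) :
    l.foldl
      (fun best p =>
        let row := PySem.Dict.ofList p.2
        let raw := pvRawOf row
        if raw = "" then best
        else
          let key : Int ×ₗ Int := toLex (pvPosOf row, p.1)
          match best.get? raw with
          | none => best.insert raw key
          | some k => if key < k then best.insert raw key else best) d
    = (l.filterMap pvExt).foldl pvUpd d := by
  induction l generalizing d with
  | nil => rfl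
  | cons p r ih =>
    by_cases h : pvRawOf (PySem.Dict.ofList p.2) = "" <;>
      simp [pvExt, h, ih, pvUpd, pvKB]

theorem pv_foldlB (l : List (Int × List (String × String))) (acc : List (Int × Int × String)) :
    l.foldl
      (fun acc p =>
        let row := PySem.Dict.ofList p.2
        let raw := pvRawOf row
        if raw = "" then acc
        else acc ++ [(pvPosOf row, p.1, raw)]) acc
    = acc ++ l.filterMap pvExt := by
  induction l generalizing acc with
  | nil => simp
  | cons p r ih =>
    by_cases h : pvRawOf (PySem.Dict.ofList p.2) = "" <;>
      simp [pvExt, h, ih]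

-- the dedup scan of B, with the seen set and the output list kept equal
theorem pv_scan (l : List (Int × Int × String)) (seen : List String) :
    l.foldl
      (fun (st : PySem.Set String × List String) t =>
        if PySem.Set.contains st.1 t.2.2 then st
        else (PySem.Set.add st.1 t.2.2, st.2 ++ [t.2.2]))
      (seen, seen)
    = ((l.map pvUrl).foldl PySem.Set.add seen, (l.map pvUrl).foldl PySem.Set.add seen) := by
  induction l generalizing seen with
  | nil => rfl
  | cons t r ih =>
    simp only [List.foldl_cons, List.map_cons, pvUrl]
    by_cases h : t.2.2 ∈ seen
    · have hc : PySem.Set.contains seen t.2.2 = true := by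
        simpa [PySem.Set.contains] using List.contains_iff_mem.mpr h
      have ha : PySem.Set.add seen t.2.2 = seen := by
        simp [PySem.Set.add, List.contains_iff_mem, h]
      rw [if_pos hc, ha]
      exact ih seen
    · have hc : ¬ (PySem.Set.contains seen t.2.2 = true) := by
        simp only [PySem.Set.contains]
        rw [List.contains_iff_mem]
        exact h
      have ha : PySem.Set.add seen t.2.2 = seen ++ [t.2.2] := by
        simp [PySem.Set.add, List.contains_iff_mem, h]
      rw [if_neg hc, ha]
      exact ih (seen ++ [t.2.2])

theorem pv_foldl_add_skip (xs : List String) (acc : PySem.Set String) (a : String)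
    (h : a ∈ acc) :
    xs.foldl PySem.Set.add acc = (xs.filter (fun y => y ≠ a)).foldl PySem.Set.add acc := by
  induction xs generalizing acc with
  | nil => rfl
  | cons y r ih =>
    by_cases hy : y = a
    · subst hy
      have : PySem.Set.add acc y = acc := by
        simp [PySem.Set.add, List.contains_iff_mem, h]
      rw [List.filter_cons_of_neg (by simp), List.foldl_cons, this, ih _ h]
    · rw [List.filter_cons_of_pos (by simp [hy]), List.foldl_cons, List.foldl_cons]
      exact ih _ (by simp [PySem.Set.mem_add, h])

theorem pv_foldl_add_head (xs : List String) (acc : List String) (x : String)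
    (h : ∀ y ∈ xs, y ≠ x) :
    xs.foldl PySem.Set.add (x :: acc) = x :: xs.foldl PySem.Set.add acc := by
  induction xs generalizing acc with
  | nil => rfl
  | cons y r ih =>
    have hy : y ≠ x := h y (by simp)
    have hadd : PySem.Set.add (x :: acc) y = x :: PySem.Set.add acc y := by
      simp only [PySem.Set.add, PySem.Set.contains, List.contains_cons,
        beq_eq_false_iff_ne.mpr hy, Bool.false_or]
      split <;> rfl
    rw [List.foldl_cons, hadd, List.foldl_cons]
    exact ih _ (fun z hz => h z (by simp [hz]))

-- PySem.Set.ofList unfolds one step: first element kept, later copies dropped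
theorem pv_ofList_cons (x : String) (xs : List String) :
    PySem.Set.ofList (x :: xs) = x :: PySem.Set.ofList (xs.filter (fun y => y ≠ x)) := by
  rw [PySem.Set.ofList_eq_foldl, PySem.Set.ofList_eq_foldl, List.foldl_cons]
  have h1 : PySem.Set.add ([] : PySem.Set String) x = [x] := rfl
  rw [h1, pv_foldl_add_skip xs [x] x (by simp)]
  exact pv_foldl_add_head _ [] x (fun y hy => by simp at hy; exact hy.2)

theorem pv_dedup_firstBy (l : List (Int × Int × String)) :
    PySem.List.dedup (l.map pvUrl) = (pvFirstBy l).map pvUrl := by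
  induction l using pvFirstBy_induction with
  | h0 => rfl
  | h1 t r ih =>
    rw [List.map_cons, show PySem.List.dedup = PySem.Set.ofList from rfl, pv_ofList_cons,
      pvFirstBy_cons, List.map_cons]
    congr 1
    rw [List.filter_map]
    have hp : ((fun y => decide (y ≠ pvUrl t)) ∘ pvUrl)
        = (fun t' : Int × Int × String => decide (t'.2.2 ≠ t.2.2)) := by
      funext t'; simp [pvUrl]
    rw [hp, ← ih, show PySem.List.dedup = PySem.Set.ofList from rfl]

theorem pv_firstBy_sublist (l : List (Int × Int × String)) : (pvFirstBy l).Sublist l := by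
  induction l using pvFirstBy_induction with
  | h0 => simp [pvFirstBy, pvFirstByAux]
  | h1 t r ih =>
    rw [pvFirstBy_cons]
    exact List.Sublist.cons₂ t (ih.trans (List.filter_sublist))

theorem pv_firstBy_urls_nodup (l : List (Int × Int × String)) :
    ((pvFirstBy l).map pvUrl).Nodup := by
  induction l using pvFirstBy_induction with
  | h0 => simp [pvFirstBy, pvFirstByAux]
  | h1 t r ih =>
    rw [pvFirstBy_cons, List.map_cons, List.nodup_cons]
    refine ⟨?_, ih⟩
    intro hmem
    obtain ⟨t', ht', hu⟩ := List.mem_map.mp hmem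
    have hsub := (pv_firstBy_sublist _).subset ht'
    simp only [List.mem_filter, decide_eq_true_eq] at hsub
    exact hsub.2 (by simpa [pvUrl] using hu)

theorem pv_ts_pairwise (g : List (List (String × String))) :
    (pvTs g).Pairwise (fun a b => a.2.1 < b.2.1) := by
  rw [pvTs, List.pairwise_filterMap]
  apply List.Pairwise.imp ?_ (PySem.List.pairwise_lt_enumerate g 0)
  intro a b hab x hx y hy
  have hx1 : x.2.1 = a.1 := by
    by_cases h : pvRawOf (PySem.Dict.ofList a.2) = "" <;> simp [pvExt, h] at hx
    rw [← hx]
  have hy1 : y.2.1 = b.1 := by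
    by_cases h : pvRawOf (PySem.Dict.ofList b.2) = "" <;> simp [pvExt, h] at hy
    rw [← hy]
  rw [hx1, hy1]; exact hab

theorem pv_firstBy_mem_iff (s : List (Int × Int × String))
    (hle : s.Pairwise (fun a b => pvKB a ≤ pvKB b)) (u : String) (k : Int ×ₗ Int) :
    ((u, k) ∈ (pvFirstBy s).map (fun t => (t.2.2, pvKB t))) ↔ pvMk u s = some k := by
  induction s using pvFirstBy_induction with
  | h0 => simp [pvFirstBy, pvFirstByAux, pvMk]
  | h1 t r ih =>
    have hhead : ∀ y ∈ r, pvKB t ≤ pvKB y := fun y hy => List.rel_of_pairwise_cons hle hy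
    have htail : r.Pairwise (fun a b => pvKB a ≤ pvKB b) := List.Pairwise.of_cons hle
    have hF : (r.filter (fun t' => t'.2.2 ≠ t.2.2)).Pairwise (fun a b => pvKB a ≤ pvKB b) :=
      htail.sublist (List.filter_sublist)
    rw [pvFirstBy_cons, List.map_cons]
    by_cases hu : t.2.2 = u
    · have hmk : pvMk u (t :: r) = some (pvKB t) := by
        rw [pvMk, pvVal, if_pos hu]
        cases hr : pvMk u r with
        | none => rfl
        | some z =>
          obtain ⟨t', ht', _, hz⟩ := pv_mk_mem u r z hr
          simp only [pvOmin, Option.some.injEq]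
          rw [hz]; exact min_eq_left (hhead t' ht')
      rw [hmk]
      constructor
      · intro hmem
        rcases List.mem_cons.mp hmem with heq | hmem'
        · simp only [Prod.mk.injEq] at heq
          rw [heq.2]
        · exfalso
          obtain ⟨t', ht', heq⟩ := List.mem_map.mp hmem'
          have hsub := (pv_firstBy_sublist _).subset ht'
          simp only [List.mem_filter, decide_eq_true_eq] at hsub
          apply hsub.2
          rw [hu]
          simpa using congrArg Prod.fst heq
      · intro hsome
        simp only [Option.some.injEq] at hsome
        exact List.mem_cons.mpr (Or.inl (by rw [hu, hsome]))
    · have hmk : pvMk u (t :: r) = pvMk u (r.filter (fun t' => t'.2.2 ≠ t.2.2)) := by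
        rw [pvMk, pvVal, if_neg hu, pv_mk_filter (u := u) (w := t.2.2) hu r]
        rfl
      rw [hmk, ← ih hF]
      constructor
      · intro hmem
        rcases List.mem_cons.mp hmem with heq | hmem'
        · exact absurd (congrArg Prod.fst heq) (by simpa using fun h => hu h.symm)
        · exact hmem'
      · intro hmem; exact List.mem_cons.mpr (Or.inr hmem)

theorem pv_main (g : List (List (String × String))) :
    iter_ranked_group_image_urls_py g = iter_ranked_group_image_urls_py_alt g := by
  have hA : iter_ranked_group_image_urls_py g
      = (PySem.List.sorted ((pvTs g).foldl pvUpd PySem.Dict.empty).items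
          (fun kv => kv.2)).map (fun kv => kv.1) := by
    rw [iter_ranked_group_image_urls_py, pv_foldlA]; rfl
  have hB : iter_ranked_group_image_urls_py_alt g
      = PySem.List.dedup ((PySem.List.sorted (pvTs g) pvKB).map pvUrl) := by
    rw [iter_ranked_group_image_urls_py_alt, pv_foldlB]
    rw [show ([] : List (Int × Int × String)) ++ (PySem.List.enumerate g).filterMap pvExt
        = pvTs g from by rw [List.nil_append]; rfl]
    rw [show (fun (t : Int × Int × String) => (toLex (t.1, t.2.1) : Int ×ₗ Int)) = pvKB from rfl]
    rw [show ((PySem.Set.empty : PySem.Set String), ([] : List String))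
        = (([] : List String), ([] : List String)) from rfl, pv_scan]
    rw [show PySem.List.dedup ((PySem.List.sorted (pvTs g) pvKB).map pvUrl)
        = ((PySem.List.sorted (pvTs g) pvKB).map pvUrl).foldl PySem.Set.add [] from by
      rw [show PySem.List.dedup = PySem.Set.ofList from rfl, PySem.Set.ofList_eq_foldl]]
  have hsperm : (PySem.List.sorted (pvTs g) pvKB).Perm (pvTs g) :=
    PySem.List.sorted_perm (pvTs g) pvKB false
  have hsle : (PySem.List.sorted (pvTs g) pvKB).Pairwise (fun a b => pvKB a ≤ pvKB b) :=
    PySem.List.sorted_pairwise (pvTs g) pvKB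
  have hidx : (PySem.List.sorted (pvTs g) pvKB).Pairwise (fun a b => a.2.1 ≠ b.2.1) := by
    have h1 : (pvTs g).Pairwise (fun a b => a.2.1 ≠ b.2.1) :=
      (pv_ts_pairwise g).imp (fun h => ne_of_lt h)
    exact (List.Perm.pairwise_iff (fun {a b} h => Ne.symm h) hsperm).mpr h1
  have hslt : (PySem.List.sorted (pvTs g) pvKB).Pairwise (fun a b => pvKB a < pvKB b) := by
    refine (hsle.and hidx).imp ?_
    intro a b hab
    refine lt_of_le_of_ne hab.1 (fun he => ?_)
    have h2 : a.1 = b.1 ∧ a.2.1 = b.2.1 := by simpa [pvKB] using he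
    exact hab.2 h2.2
  have hkeys : ((pvTs g).foldl pvUpd PySem.Dict.empty).keys.Nodup :=
    pv_nodup_fold (pvTs g) PySem.Dict.empty (by simp [PySem.Dict.keys, PySem.Dict.empty])
  have hnodupA : ((pvTs g).foldl pvUpd PySem.Dict.empty).items.Nodup := by
    have hk := hkeys
    simp only [PySem.Dict.keys] at hk
    exact hk.of_map
  have hnodupC : ((pvFirstBy (PySem.List.sorted (pvTs g) pvKB)).map
      (fun t => (t.2.2, pvKB t))).Nodup := by
    have hn := pv_firstBy_urls_nodup (PySem.List.sorted (pvTs g) pvKB)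
    have hmap : ((pvFirstBy (PySem.List.sorted (pvTs g) pvKB)).map
        (fun t => (t.2.2, pvKB t))).map Prod.fst
        = (pvFirstBy (PySem.List.sorted (pvTs g) pvKB)).map pvUrl := by
      rw [List.map_map]; rfl
    exact List.Nodup.of_map Prod.fst (hmap ▸ hn)
  have hget : ∀ u, ((pvTs g).foldl pvUpd PySem.Dict.empty).get? u = pvMk u (pvTs g) := by
    intro u
    rw [pv_get?_fold]
    rfl
  have hperm : ((pvFirstBy (PySem.List.sorted (pvTs g) pvKB)).map
      (fun t => (t.2.2, pvKB t))).Perm ((pvTs g).foldl pvUpd PySem.Dict.empty).items := by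
    rw [List.perm_ext_iff_of_nodup hnodupC hnodupA]
    intro p
    obtain ⟨u, k⟩ := p
    rw [pv_firstBy_mem_iff _ hsle u k]
    constructor
    · intro hmk
      apply PySem.Dict.mem_items_of_get?_eq_some
      rw [hget u, ← pv_mk_perm hsperm u]
      exact hmk
    · intro hmem
      have hs := (PySem.Dict.get?_eq_some_iff_mem_items _ _ _ hkeys).mpr hmem
      rw [hget u] at hs
      rw [pv_mk_perm hsperm u]
      exact hs
  have hCpair : ((pvFirstBy (PySem.List.sorted (pvTs g) pvKB)).map
      (fun t => (t.2.2, pvKB t))).Pairwise (fun a b => a.2 < b.2) := by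
    rw [List.pairwise_map]
    exact List.Pairwise.sublist (pv_firstBy_sublist _) hslt
  have hsorted : PySem.List.sorted ((pvTs g).foldl pvUpd PySem.Dict.empty).items
      (fun kv => kv.2)
      = (pvFirstBy (PySem.List.sorted (pvTs g) pvKB)).map (fun t => (t.2.2, pvKB t)) :=
    PySem.List.sorted_eq_of_perm_of_pairwise_lt _ _ _ hperm hCpair
  rw [hA, hB, hsorted, pv_dedup_firstBy, List.map_map]
  rfl

-- ===== VERDICT (by name: the statement is the Claim_ definition above) =====
theorem iter_ranked_group_image_urls_py_spec : Claim_equal_iter_ranked_group_image_urls_py := by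
  intro g _
  exact pv_main g
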